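-- pv_equiv track=rewrite | github.com/JoshuaMKW/Super-Mario-Eclipse | tools/pyiiasmh/ppctools.py | _format_rawhex
-- ===== SOURCE A (Python) =====
-- def _format_rawhex(rawhex: str) -> str:
--     # Format raw hex into readable Gecko/WiiRd codes
--     code = []
--
--     for i in range(0, len(rawhex), 8):
--         code.append(rawhex[i:(i+8)])
--     for i in range(1, len(code), 2):
--         code[i] += "\n"
--     for i in range(0, len(code), 2):
--         code[i] += " "
--
--     return "".join(code)
-- ===== SOURCE B (Python) =====
-- def _format_rawhex(rawhex: str) -> str:
--     # One pairwise pass: emit each finished line (pair of 8-char chunks) directly.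
--     parts = []
--     n = len(rawhex)
--     i = 0
--     while i < n:
--         if n - i > 8:
--             parts.append(rawhex[i:i+8] + " " + rawhex[i+8:i+16] + "\n")
--         else:
--             parts.append(rawhex[i:i+8] + " ")
--         i += 16
--     return "".join(parts)
-- ===== Notes on version B (the rewrite author's own statement) =====
-- stated objective: alternative
-- what changed: B makes a single pairwise pass over 16-character blocks, emitting each finished line (chunk + ' ' + chunk + '\n', or a lone trailing chunk + ' ') directly, instead of A's three index-keyed passes (build chunk list, append newline at odd indices, append space at even indices).
import Mathlib
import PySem

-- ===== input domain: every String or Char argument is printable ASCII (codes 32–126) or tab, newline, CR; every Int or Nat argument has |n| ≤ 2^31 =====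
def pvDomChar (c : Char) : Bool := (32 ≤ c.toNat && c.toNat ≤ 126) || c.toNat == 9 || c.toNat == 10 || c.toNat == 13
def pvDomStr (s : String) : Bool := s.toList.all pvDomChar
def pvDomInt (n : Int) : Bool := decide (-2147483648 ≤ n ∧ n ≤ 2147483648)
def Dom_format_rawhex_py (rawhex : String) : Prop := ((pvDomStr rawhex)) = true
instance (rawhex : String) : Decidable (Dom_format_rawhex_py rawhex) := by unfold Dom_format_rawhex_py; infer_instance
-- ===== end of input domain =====

-- B replaces A's three index-keyed passes by one pairwise pass emitting each finished line; objective: alternative decomposition (same O(n) cost).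

-- ===== PORT A =====
-- A, step for step: build the 8-char chunk list, append "\n" at odd indices,
-- append " " at even indices, then "".join.  Strings are carried as List Char
-- (PySem.Chars is the exact model of Python str on this domain).
def format_rawhex_py (rawhex : String) : String :=
  let s := rawhex.toList
  -- for i in range(0, len(rawhex), 8): code.append(rawhex[i:i+8])
  let code : List (List Char) :=
    (PySem.List.pyRange 0 (PySem.Str.len rawhex) 8).foldl
      (fun code i => code ++ [PySem.Chars.slice s (some i) (some (i + 8))]) []
  -- for i in range(1, len(code), 2): code[i] += "\n"
  let code :=
    (PySem.List.pyRange 1 (PySem.List.len code) 2).foldl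
      (fun c i => PySem.List.pySetD c i (PySem.List.pyGetD c i [] ++ ['\n'])) code
  -- for i in range(0, len(code), 2): code[i] += " "
  let code :=
    (PySem.List.pyRange 0 (PySem.List.len code) 2).foldl
      (fun c i => PySem.List.pySetD c i (PySem.List.pyGetD c i [] ++ [' '])) code
  -- return "".join(code)
  String.ofList (PySem.Chars.join [] code)

-- ===== PORT B =====
-- B's while loop: the index i advances by 16 (two chunks) per step, emitting the
-- finished line; a final lone chunk gets its trailing space.  Slices rawhex[i:i+8]
-- are (s.drop i).take 8 on the character list (= PySem.List.slice with Nat bounds).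
def pvFmtIdx (s : List Char) (i : Nat) : List Char :=
  if i < s.length then
    if 8 < s.length - i then
      (s.drop i).take 8 ++ [' '] ++ (s.drop (i + 8)).take 8 ++ ['\n'] ++ pvFmtIdx s (i + 16)
    else
      (s.drop i).take 8 ++ [' ']
  else []
termination_by s.length - i
decreasing_by omega

def format_rawhex_py_alt (rawhex : String) : String :=
  String.ofList (pvFmtIdx rawhex.toList 0)

-- ===== PRECONDITION & SPEC =====
def Spec_format_rawhex_py (rawhex : String) (out : String) : Prop := out = format_rawhex_py_alt rawhex
instance (rawhex : String) (out : String) : Decidable (Spec_format_rawhex_py rawhex out) := by unfold Spec_format_rawhex_py; infer_instance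

-- ===== CLAIM (what is proved, stated in full; the proofs are below) =====
def Claim_equal_format_rawhex_py : Prop := ∀ (rawhex : String), Dom_format_rawhex_py rawhex → Spec_format_rawhex_py rawhex (format_rawhex_py rawhex)

-- ===== LEMMAS AND PROOFS =====

-- the chunk list [s[0:8], s[8:16], …] as a structural recursion
def pvChunks8 (s : List Char) : List (List Char) :=
  if hne : s = [] then [] else s.take 8 :: pvChunks8 (s.drop 8)
termination_by s.length
decreasing_by
  have : 0 < s.length := List.length_pos_iff.mpr hne
  simp [List.length_drop]; omega

-- pairwise join of a chunk list (the value both pipelines compute)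
def pvPairJoin : List (List Char) → List Char
  | [] => []
  | [c] => c ++ [' ']
  | c0 :: c1 :: r => c0 ++ [' '] ++ c1 ++ ['\n'] ++ pvPairJoin r

-- range cons lemmas for literal steps 2 and 8
theorem pvRange_cons2 (a b : Int) (h : a < b) :
    PySem.List.pyRange a b 2 = a :: PySem.List.pyRange (a + 2) b 2 := by
  rw [PySem.List.pyRange_of_pos _ _ (by norm_num), PySem.List.pyRange_of_pos _ _ (by norm_num)]
  have hc : (if a < b then ((b - a + 2 - 1) / 2).toNat else 0)
      = (if a + 2 < b then ((b - (a + 2) + 2 - 1) / 2).toNat else 0) + 1 := by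
    split_ifs <;> omega
  rw [hc, List.range_succ_eq_map, List.map_cons, List.map_map]
  refine List.cons_eq_cons.mpr ⟨by simp, List.map_congr_left fun k _ => ?_⟩
  simp [Function.comp]; ring

theorem pvRange_cons8 (a b : Int) (h : a < b) :
    PySem.List.pyRange a b 8 = a :: PySem.List.pyRange (a + 8) b 8 := by
  rw [PySem.List.pyRange_of_pos _ _ (by norm_num), PySem.List.pyRange_of_pos _ _ (by norm_num)]
  have hc : (if a < b then ((b - a + 8 - 1) / 8).toNat else 0)
      = (if a + 8 < b then ((b - (a + 8) + 8 - 1) / 8).toNat else 0) + 1 := by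
    split_ifs <;> omega
  rw [hc, List.range_succ_eq_map, List.map_cons, List.map_map]
  refine List.cons_eq_cons.mpr ⟨by simp, List.map_congr_left fun k _ => ?_⟩
  simp [Function.comp]; ring

theorem pvRange_nil8 (a b : Int) (h : b ≤ a) : PySem.List.pyRange a b 8 = [] := by
  rw [PySem.List.pyRange_of_pos _ _ (by norm_num), if_neg (by omega)]
  simp

theorem pvRange_shift2 (a b : Int) :
    (PySem.List.pyRange (a + 2) b 2).map (· - 2) = PySem.List.pyRange a (b - 2) 2 := by
  rw [PySem.List.pyRange_of_pos _ _ (by norm_num : (0:Int) < 2),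
      PySem.List.pyRange_of_pos _ _ (by norm_num : (0:Int) < 2), List.map_map]
  have hc : (if a + 2 < b then ((b - (a + 2) + 2 - 1) / 2).toNat else 0)
      = (if a < b - 2 then ((b - 2 - a + 2 - 1) / 2).toNat else 0) := by
    split_ifs <;> omega
  rw [hc]
  exact List.map_congr_left fun k _ => by simp [Function.comp]; ring

-- one decoration pass shifted past two untouched cells
theorem pvFold_shift2 (suf : List Char) :
    ∀ (r : List Int), (∀ i ∈ r, 2 ≤ i) → ∀ (x y : List Char) (c : List (List Char)),
    r.foldl (fun l i => PySem.List.pySetD l i (PySem.List.pyGetD l i [] ++ suf)) (x :: y :: c)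
      = x :: y :: (r.map (· - 2)).foldl
          (fun l i => PySem.List.pySetD l i (PySem.List.pyGetD l i [] ++ suf)) c := by
  intro r
  induction r with
  | nil => intro _ x y c; simp
  | cons i r ih =>
    intro hmem x y c
    have hi : 2 ≤ i := hmem i (by simp)
    have h0 : (0:Int) ≤ i := by omega
    have h2 : (0:Int) ≤ i - 2 := by omega
    have ht : i.toNat = (i - 2).toNat + 2 := by omega
    have hstep : PySem.List.pySetD (x :: y :: c) i (PySem.List.pyGetD (x :: y :: c) i [] ++ suf)
        = x :: y :: PySem.List.pySetD c (i - 2) (PySem.List.pyGetD c (i - 2) [] ++ suf) := by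
      rw [PySem.List.pySetD_of_nonneg _ _ h0, PySem.List.pySetD_of_nonneg _ _ h2,
        PySem.List.pyGetD_of_nonneg _ _ h0, PySem.List.pyGetD_of_nonneg _ _ h2, ht]
      simp [List.set, List.getD]
    simp only [List.foldl_cons, List.map_cons, hstep]
    exact ih (fun j hj => hmem j (by simp [hj])) x y _

-- the odd-index '\n' pass, characterised structurally
theorem pvFold1_nil (suf : List Char) :
    (PySem.List.pyRange 1 (PySem.List.len ([] : List (List Char))) 2).foldl
      (fun l i => PySem.List.pySetD l i (PySem.List.pyGetD l i [] ++ suf)) [] = [] := by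
  have : PySem.List.pyRange 1 (PySem.List.len ([] : List (List Char))) 2 = [] := by decide
  rw [this]
  rfl

theorem pvFold1_single (suf : List Char) (c : List Char) :
    (PySem.List.pyRange 1 (PySem.List.len [c]) 2).foldl
      (fun l i => PySem.List.pySetD l i (PySem.List.pyGetD l i [] ++ suf)) [c] = [c] := by
  have : PySem.List.pyRange 1 (PySem.List.len [c]) 2 = [] := by
    simp [PySem.List.len_eq]; decide
  rw [this]
  rfl

theorem pvFold1_cons2 (suf : List Char) (c0 c1 : List Char) (r : List (List Char)) :
    (PySem.List.pyRange 1 (PySem.List.len (c0 :: c1 :: r)) 2).foldl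
      (fun l i => PySem.List.pySetD l i (PySem.List.pyGetD l i [] ++ suf)) (c0 :: c1 :: r)
    = c0 :: (c1 ++ suf) :: (PySem.List.pyRange 1 (PySem.List.len r) 2).foldl
      (fun l i => PySem.List.pySetD l i (PySem.List.pyGetD l i [] ++ suf)) r := by
  simp only [PySem.List.len_eq, List.length_cons]
  have hb : (1:Int) < ((r.length + 1 + 1 : Nat) : Int) := by push_cast; omega
  rw [pvRange_cons2 _ _ hb, List.foldl_cons]
  have hstep : PySem.List.pySetD (c0 :: c1 :: r) 1 (PySem.List.pyGetD (c0 :: c1 :: r) 1 [] ++ suf)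
      = c0 :: (c1 ++ suf) :: r := by
    rw [PySem.List.pySetD_of_nonneg _ _ (by norm_num), PySem.List.pyGetD_of_nonneg _ _ (by norm_num)]
    simp [List.set, List.getD]
  rw [hstep]
  have hmem : ∀ i ∈ PySem.List.pyRange (1 + 2) ((r.length + 1 + 1 : Nat) : Int) 2, (2:Int) ≤ i := by
    intro i hi
    have := (PySem.List.mem_pyRange_iff_of_pos (by norm_num : (0:Int) < 2) i).mp hi
    omega
  rw [pvFold_shift2 suf _ hmem, pvRange_shift2,
    show ((r.length + 1 + 1 : Nat) : Int) - 2 = (r.length : Int) from by push_cast; ring]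

-- the even-index ' ' pass, characterised structurally
theorem pvFold0_single (suf : List Char) (c : List Char) :
    (PySem.List.pyRange 0 (PySem.List.len [c]) 2).foldl
      (fun l i => PySem.List.pySetD l i (PySem.List.pyGetD l i [] ++ suf)) [c] = [c ++ suf] := by
  have : PySem.List.pyRange 0 (PySem.List.len [c]) 2 = [0] := by
    simp [PySem.List.len_eq]; decide
  rw [this]
  simp [PySem.List.pySetD_of_nonneg _ _ (le_refl (0:Int)),
    PySem.List.pyGetD_of_nonneg _ _ (le_refl (0:Int)), List.getD]

theorem pvFold0_cons2 (suf : List Char) (c0 c1 : List Char) (r : List (List Char)) :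
    (PySem.List.pyRange 0 (PySem.List.len (c0 :: c1 :: r)) 2).foldl
      (fun l i => PySem.List.pySetD l i (PySem.List.pyGetD l i [] ++ suf)) (c0 :: c1 :: r)
    = (c0 ++ suf) :: c1 :: (PySem.List.pyRange 0 (PySem.List.len r) 2).foldl
      (fun l i => PySem.List.pySetD l i (PySem.List.pyGetD l i [] ++ suf)) r := by
  simp only [PySem.List.len_eq, List.length_cons]
  have hb : (0:Int) < ((r.length + 1 + 1 : Nat) : Int) := by push_cast; omega
  rw [pvRange_cons2 _ _ hb, List.foldl_cons]
  have hstep : PySem.List.pySetD (c0 :: c1 :: r) 0 (PySem.List.pyGetD (c0 :: c1 :: r) 0 [] ++ suf)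
      = (c0 ++ suf) :: c1 :: r := by
    rw [PySem.List.pySetD_of_nonneg _ _ (le_refl (0:Int)),
      PySem.List.pyGetD_of_nonneg _ _ (le_refl (0:Int))]
    simp [List.getD]
  rw [hstep]
  have hmem : ∀ i ∈ PySem.List.pyRange (0 + 2) ((r.length + 1 + 1 : Nat) : Int) 2, (2:Int) ≤ i := by
    intro i hi
    have := (PySem.List.mem_pyRange_iff_of_pos (by norm_num : (0:Int) < 2) i).mp hi
    omega
  rw [pvFold_shift2 suf _ hmem, pvRange_shift2,
    show ((r.length + 1 + 1 : Nat) : Int) - 2 = (r.length : Int) from by push_cast; ring]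

theorem pvJoin_empty (l : List (List Char)) : PySem.Chars.join [] l = l.flatten := by
  induction l with
  | nil => simp [PySem.Chars.join, List.intercalate]
  | cons x l ih =>
    cases l with
    | nil => simp [PySem.Chars.join, List.intercalate]
    | cons y t =>
      rw [PySem.Chars.join_cons_cons, ih]
      simp

-- both decoration passes followed by the join give the pairwise join
theorem pvDecorate_eq_pairJoin (c : List (List Char)) :
    PySem.Chars.join []
      ((PySem.List.pyRange 0
          (PySem.List.len ((PySem.List.pyRange 1 (PySem.List.len c) 2).foldl
            (fun l i => PySem.List.pySetD l i (PySem.List.pyGetD l i [] ++ ['\n'])) c)) 2).foldl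
        (fun l i => PySem.List.pySetD l i (PySem.List.pyGetD l i [] ++ [' ']))
        ((PySem.List.pyRange 1 (PySem.List.len c) 2).foldl
          (fun l i => PySem.List.pySetD l i (PySem.List.pyGetD l i [] ++ ['\n'])) c))
    = pvPairJoin c := by
  induction c using pvPairJoin.induct with
  | case1 =>
    rw [pvFold1_nil]
    rw [show (PySem.List.pyRange 0 (PySem.List.len ([] : List (List Char))) 2) = [] from by decide]
    simp [pvPairJoin, PySem.Chars.join_nil]
  | case2 c =>
    rw [pvFold1_single, pvFold0_single]
    rw [pvJoin_empty]
    simp [pvPairJoin]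
  | case3 c0 c1 r ih =>
    rw [pvFold1_cons2, pvFold0_cons2, pvJoin_empty]
    rw [pvJoin_empty] at ih
    simp only [List.flatten_cons, ih]
    simp [pvPairJoin]

-- A's first loop builds exactly the structural chunk list
theorem pvChunkMapAux (s : List Char) :
    ∀ (n a : Nat), s.length ≤ a + n →
    (PySem.List.pyRange (a : Int) ((s.length : Int)) 8).map
      (fun i => PySem.Chars.slice s (some i) (some (i + 8))) = pvChunks8 (s.drop a) := by
  intro n
  induction n with
  | zero =>
    intro a h
    rw [pvRange_nil8 _ _ (by omega)]
    rw [List.drop_eq_nil_of_le (by omega)]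
    simp [pvChunks8]
  | succ n ih =>
    intro a h
    by_cases hlt : a < s.length
    · rw [pvRange_cons8 _ _ (by exact_mod_cast hlt), List.map_cons]
      have hhead : PySem.Chars.slice s (some (a : Int)) ((some ((a : Int) + 8))) = (s.drop a).take 8 := by
        have := PySem.List.slice_natCast_add s a 8
        push_cast at this ⊢
        exact this
      have htail : ((a : Int) + 8) = (((a + 8 : Nat)) : Int) := by push_cast; ring
      have hda : (List.drop a s) ≠ [] := by
        intro he
        have h0 := congrArg List.length he
        simp [List.length_drop] at h0
        omega
      have hrhs : pvChunks8 (s.drop a) = (s.drop a).take 8 :: pvChunks8 (s.drop (a + 8)) := by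
        rw [pvChunks8, dif_neg hda, List.drop_drop]
      rw [hhead, htail, ih (a + 8) (by omega), hrhs]
    · rw [pvRange_nil8 _ _ (by exact_mod_cast Nat.le_of_not_lt hlt)]
      rw [List.drop_eq_nil_of_le (by omega)]
      simp [pvChunks8]

theorem pvChunkFold (s : List Char) :
    (PySem.List.pyRange 0 ((s.length : Int)) 8).foldl
      (fun code i => code ++ [PySem.Chars.slice s (some i) (some (i + 8))]) []
    = pvChunks8 s := by
  have hmap : ∀ (r : List Int) (acc : List (List Char)),
      r.foldl (fun code i => code ++ [PySem.Chars.slice s (some i) (some (i + 8))]) acc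
      = acc ++ r.map (fun i => PySem.Chars.slice s (some i) (some (i + 8))) := by
    intro r
    induction r with
    | nil => intro acc; simp
    | cons i r ih =>
      intro acc
      rw [List.foldl_cons, ih]
      simp
  rw [hmap, List.nil_append]
  have := pvChunkMapAux s s.length 0 (by omega)
  simpa using this

-- proof-side restatement of B's loop as structural recursion on the remaining suffix
def pvFmt (rest : List Char) : List Char :=
  if _h : rest = [] then []
  else if 8 < rest.length then
    rest.take 8 ++ [' '] ++ (rest.drop 8).take 8 ++ ['\n'] ++ pvFmt (rest.drop 16)
  else
    rest.take 8 ++ [' ']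
termination_by rest.length
decreasing_by simp [List.length_drop]; omega

theorem pvFmtIdx_eq_pvFmt (s : List Char) : ∀ (i : Nat), pvFmtIdx s i = pvFmt (s.drop i) := by
  intro i
  induction i using pvFmtIdx.induct s with
  | case1 i hlt hbig ih =>
    have hne : List.drop i s ≠ [] := by
      intro he
      have h0 := congrArg List.length he
      simp [List.length_drop] at h0
      omega
    have hlen : 8 < (List.drop i s).length := by simp [List.length_drop]; omega
    rw [pvFmtIdx, if_pos hlt, if_pos hbig, ih]
    conv_rhs => rw [pvFmt]
    rw [dif_neg hne, if_pos hlen, List.drop_drop, List.drop_drop]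
  | case2 i hlt hbig =>
    have hne : List.drop i s ≠ [] := by
      intro he
      have h0 := congrArg List.length he
      simp [List.length_drop] at h0
      omega
    rw [pvFmtIdx, if_pos hlt, if_neg hbig]
    conv_rhs => rw [pvFmt]
    rw [dif_neg hne, if_neg (by simp [List.length_drop]; omega)]
  | case3 i hge =>
    rw [pvFmtIdx, if_neg hge, List.drop_eq_nil_of_le (by omega), pvFmt, dif_pos rfl]

-- B equals the pairwise join of the chunk list
theorem pvFmt_eq_pairJoin (s : List Char) : pvFmt s = pvPairJoin (pvChunks8 s) := by
  induction s using pvFmt.induct with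
  | case1 => simp [pvFmt, pvChunks8, pvPairJoin]
  | case2 s hne hlen ih =>
    rw [pvFmt, dif_neg hne, if_pos hlen]
    rw [pvChunks8, dif_neg hne]
    rw [pvChunks8, dif_neg (by
      intro he
      have h0 : (s.drop 8).length = 0 := by rw [he]; rfl
      simp [List.length_drop] at h0
      omega)]
    rw [List.drop_drop, show (8 + 8 : Nat) = 16 from rfl]
    rw [pvPairJoin, ih]
  | case3 s hne hlen =>
    rw [pvFmt, dif_neg hne, if_neg hlen]
    rw [pvChunks8, dif_neg hne]
    rw [List.drop_eq_nil_of_le (by omega)]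
    rw [pvChunks8, dif_pos rfl]
    rfl

-- ===== VERDICT (by name: the statement is the Claim_ definition above) =====
theorem format_rawhex_py_spec : Claim_equal_format_rawhex_py := by
  intro rawhex _
  unfold Spec_format_rawhex_py format_rawhex_py format_rawhex_py_alt
  simp only [PySem.Str.len_eq]
  rw [pvChunkFold, pvDecorate_eq_pairJoin, pvFmtIdx_eq_pvFmt, List.drop_zero, pvFmt_eq_pairJoin]
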